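-- pv_equiv track=rewrite | github.com/ryk5/LLMArena | llm_arena/games/chess/prompts.py | _format_move_history
-- ===== SOURCE A (Python) =====
-- def _format_move_history(move_history: list[str]) -> str:
--     """Format the move history as numbered move pairs."""
--     lines: list[str] = []
--     for i in range(0, len(move_history), 2):
--         move_num = i // 2 + 1
--         white_move = move_history[i]
--         if i + 1 < len(move_history):
--             black_move = move_history[i + 1]
--             lines.append(f"{move_num}. {white_move} {black_move}")
--         else:
--             lines.append(f"{move_num}. {white_move}")
--     return "\n".join(lines)
-- ===== SOURCE B (Python) =====
-- def _format_move_history(move_history: list[str]) -> str: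
--     """Format the move history as numbered move pairs."""
--     lines = []
--     it = iter(move_history)
--     for n, white in enumerate(it, 1):
--         black = next(it, None)
--         if black is None:
--             lines.append(f"{n}. {white}")
--         else:
--             lines.append(f"{n}. {white} {black}")
--     return "\n".join(lines)
-- ===== Notes on version B (the rewrite author's own statement) =====
-- stated objective: simpler
-- what changed: Replaced A's index-stepping range(0, len, 2) loop with floordiv numbering and bounds-checked indexing by a single pass that pairs moves by pulling two items at a time from one iterator, so no indices or length comparisons are needed.
import Mathlib
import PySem

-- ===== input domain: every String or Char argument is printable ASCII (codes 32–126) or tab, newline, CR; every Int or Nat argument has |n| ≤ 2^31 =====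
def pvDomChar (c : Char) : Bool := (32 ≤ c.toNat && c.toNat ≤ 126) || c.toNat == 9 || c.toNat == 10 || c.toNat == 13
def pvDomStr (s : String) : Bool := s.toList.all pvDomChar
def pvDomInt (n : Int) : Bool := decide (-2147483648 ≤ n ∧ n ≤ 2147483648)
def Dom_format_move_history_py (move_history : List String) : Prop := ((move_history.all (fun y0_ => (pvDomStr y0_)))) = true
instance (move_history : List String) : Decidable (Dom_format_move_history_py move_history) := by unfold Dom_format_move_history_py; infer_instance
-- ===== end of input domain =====

-- B replaces A's index-stepping range(0, len, 2) loop by one pass pairing moves pulled two at a time from a single iterator (objective: simpler).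

-- ===== PORT A =====
-- loop body of A's for-loop over range(0, len(move_history), 2), named for the proof
def pvALine (move_history : List String) (i : Int) : String :=
  let move_num := PySem.Int.floordiv i 2 + 1
  let white_move := (PySem.List.pyGet? move_history i).getD ""
  if i + 1 < (move_history.length : Int) then
    let black_move := (PySem.List.pyGet? move_history (i + 1)).getD ""
    PySem.Int.toStr move_num ++ ". " ++ white_move ++ " " ++ black_move
  else
    PySem.Int.toStr move_num ++ ". " ++ white_move

def format_move_history_py (move_history : List String) : String :=
  let lines := (PySem.List.pyRange 0 (move_history.length : Int) 2).foldl
    (fun lines i => lines ++ [pvALine move_history i]) []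
  PySem.Str.join "\n" lines

-- ===== PORT B =====
-- B's for-loop over enumerate(it, 1) pulling a second item with next(it, None) each turn
def pvPairLoop (lines : List String) (n : Int) : List String → List String
  | [] => lines
  | [white] => pvPairLoop (lines ++ [PySem.Int.toStr n ++ ". " ++ white]) (n + 1) []
  | white :: black :: rest =>
      pvPairLoop (lines ++ [PySem.Int.toStr n ++ ". " ++ white ++ " " ++ black]) (n + 1) rest

def format_move_history_py_alt (move_history : List String) : String :=
  PySem.Str.join "\n" (pvPairLoop [] 1 move_history)

-- ===== PRECONDITION & SPEC =====
def Spec_format_move_history_py (move_history : List String) (out : String) : Prop := out = format_move_history_py_alt move_history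
instance (move_history : List String) (out : String) : Decidable (Spec_format_move_history_py move_history out) := by unfold Spec_format_move_history_py; infer_instance

-- ===== CLAIM (what is proved, stated in full; the proofs are below) =====
def Claim_equal_format_move_history_py : Prop := ∀ (move_history : List String), Dom_format_move_history_py move_history → Spec_format_move_history_py move_history (format_move_history_py move_history)

-- ===== LEMMAS AND PROOFS =====

theorem pyRange_two_nil (a b : Int) (h : b ≤ a) : PySem.List.pyRange a b 2 = [] := by
  rw [PySem.List.pyRange_of_pos a b (by norm_num)]
  rw [if_neg (by omega)]
  simp

theorem pyRange_two_cons (a b : Int) (h : a < b) :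
    PySem.List.pyRange a b 2 = a :: PySem.List.pyRange (a + 2) b 2 := by
  rw [PySem.List.pyRange_of_pos a b (by norm_num), PySem.List.pyRange_of_pos (a + 2) b (by norm_num)]
  rw [if_pos h]
  by_cases h2 : a + 2 < b
  · rw [if_pos h2]
    have hc : ((b - a + 2 - 1) / 2).toNat = ((b - (a + 2) + 2 - 1) / 2).toNat + 1 := by
      have : (b - a + 2 - 1) / 2 = (b - (a + 2) + 2 - 1) / 2 + 1 := by omega
      omega
    rw [hc, List.range_succ_eq_map]
    simp [List.map_map, Function.comp]
    intro k _
    ring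
  · rw [if_neg h2]
    have hc : ((b - a + 2 - 1) / 2).toNat = 1 := by omega
    rw [hc]
    simp

theorem fold_eq_go (m : Nat) : ∀ (mh : List String) (k : Nat) (acc : List String),
    mh.length = 2 * k + m →
    (PySem.List.pyRange ((2 * k : Nat) : Int) (mh.length : Int) 2).foldl
      (fun lines i => lines ++ [pvALine mh i]) acc
      = pvPairLoop acc ((k : Int) + 1) (mh.drop (2 * k)) := by
  induction m using Nat.strong_induction_on with
  | _ m ih =>
    intro mh k acc hlen
    match m, hlen with
    | 0, hlen =>
      rw [pyRange_two_nil _ _ (by omega)]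
      have hnil : mh.drop (2 * k) = [] := by
        apply List.drop_eq_nil_of_le; omega
      simp [hnil, pvPairLoop]
    | 1, hlen =>
      rw [pyRange_two_cons _ _ (by exact_mod_cast by omega)]
      rw [pyRange_two_nil _ _ (by push_cast; omega)]
      have hd : mh.drop (2 * k) = [mh[2 * k]'(by omega)] := by
        rw [List.drop_eq_getElem_cons (by omega)]
        congr 1
        apply List.drop_eq_nil_of_le; omega
      rw [hd]
      have hline : pvALine mh ((2 * k : Nat) : Int)
          = PySem.Int.toStr ((k : Int) + 1) ++ ". " ++ mh[2 * k]'(by omega) := by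
        unfold pvALine
        rw [if_neg (by push_cast; omega)]
        have hfd : PySem.Int.floordiv ((2 * k : Nat) : Int) 2 = (k : Int) := by
          rw [PySem.Int.floordiv_eq_ediv_of_pos (by norm_num)]
          push_cast; omega
        rw [hfd]
        rw [PySem.List.pyGet?_natCast]
        rw [List.getElem?_eq_getElem (by omega)]
        rfl
      simp only [List.foldl_cons, List.foldl_nil]
      rw [hline]
      simp [pvPairLoop]
    | Nat.succ (Nat.succ m'), hlen =>
      rw [pyRange_two_cons _ _ (by push_cast; omega)]
      simp only [List.foldl_cons]
      have hstep : ((2 * k : Nat) : Int) + 2 = ((2 * (k + 1) : Nat) : Int) := by push_cast; ring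
      rw [hstep]
      rw [ih m' (by omega) mh (k + 1) _ (by omega)]
      have hd : mh.drop (2 * k)
          = mh[2 * k]'(by omega) :: mh[2 * k + 1]'(by omega) :: mh.drop (2 * (k + 1)) := by
        rw [List.drop_eq_getElem_cons (by omega)]
        congr 1
        rw [List.drop_eq_getElem_cons (by omega)]
        have h21 : 2 * k + 1 + 1 = 2 * (k + 1) := by omega
        rw [h21]
      have hline : pvALine mh ((2 * k : Nat) : Int)
          = PySem.Int.toStr ((k : Int) + 1) ++ ". " ++ mh[2 * k]'(by omega) ++ " "
              ++ mh[2 * k + 1]'(by omega) := by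
        unfold pvALine
        rw [if_pos (by push_cast; omega)]
        have hfd : PySem.Int.floordiv ((2 * k : Nat) : Int) 2 = (k : Int) := by
          rw [PySem.Int.floordiv_eq_ediv_of_pos (by norm_num)]
          push_cast; omega
        have hsucc : ((2 * k : Nat) : Int) + 1 = ((2 * k + 1 : Nat) : Int) := by push_cast; ring
        rw [hfd, hsucc]
        rw [PySem.List.pyGet?_natCast, PySem.List.pyGet?_natCast]
        rw [List.getElem?_eq_getElem (by omega), List.getElem?_eq_getElem (by omega)]
        rfl
      rw [hd, hline]
      have hn : ((k : Int) + 1) + 1 = ((k + 1 : Nat) : Int) + 1 := by push_cast; ring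
      simp [pvPairLoop, hn]

-- ===== VERDICT (by name: the statement is the Claim_ definition above) =====
theorem format_move_history_py_spec : Claim_equal_format_move_history_py := by
  intro mh _
  unfold Spec_format_move_history_py format_move_history_py format_move_history_py_alt
  have h := fold_eq_go mh.length mh 0 [] (by omega)
  simp only [Nat.mul_zero, Nat.cast_zero, List.drop_zero, zero_add] at h
  show PySem.Str.join "\n" _ = _
  rw [h]
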